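-- pv_equiv track=rewrite | github.com/jac18281828/batup | expt/mergecommon.py | mergecommonsubseq
-- ===== SOURCE A (Python) =====
-- def mergecommonsubseq(pagedata):
--     """Given an array of page sequences, find and merge common subsequences"""
--
--     commonsubseq = {}
--
--     pagedatalen = len(pagedata)
--     for i in range(pagedatalen):
--       if pagedata[i] not in commonsubseq.keys():
--         for j in range(i+1, pagedatalen):
--             offset = 0
--             while offset < 3 and j+offset < pagedatalen and pagedata[i+offset] == pagedata[j+offset]:
--                 offset += 1
--             if offset > 1:
--                 # this is a common subsequence
--                 cseq = ''.join(pagedata[i:i+offset])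
--                 if pagedata[i] not in commonsubseq.keys():# or len(commonsubseq[pagedata[i]]) < len(cseq):
--                     commonsubseq[pagedata[i]] = cseq
--                 break
--
--     pagedatalen = len(pagedata)
--     pagedataout = []
--     soff = 0
--     while soff < pagedatalen:
--         offset=1
--         if pagedata[soff] in commonsubseq.keys():
--             while soff+offset < pagedatalen and commonsubseq[pagedata[soff]].startswith(''.join(pagedata[soff:soff+offset])):
--                 offset += 1
--             if offset-1 > 1:
--                 offset -= 1
--                 pagedataout.append(''.join(pagedata[soff:soff+offset]))
--             else:
--                 pagedataout.append(''.join(pagedata[soff:soff+offset]))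
--         else:
--             pagedataout.append(''.join(pagedata[soff:soff+offset]))
--         soff += offset
--
--     return pagedataout
-- ===== SOURCE B (Python) =====
-- def mergecommonsubseq(pagedata):
--     """Given an array of page sequences, find and merge common subsequences"""
--
--     n = len(pagedata)
--
--     # Index every adjacent pair by value: pair -> ascending list of start positions.
--     pairpos = {}
--     for j in range(n - 1):
--         pairpos.setdefault((pagedata[j], pagedata[j + 1]), []).append(j)
--
--     # For the first occurrence of each page value, the earliest later repeat of its
--     # adjacent pair is the first position in that pair's bucket that is > i.
--     commonsubseq = {}
--     for i in range(n - 1):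
--         key = pagedata[i]
--         if key in commonsubseq:
--             continue
--         posns = pairpos.get((pagedata[i], pagedata[i + 1]))
--         if posns:
--             j = next((t for t in posns if t > i), None)
--             if j is not None:
--                 length = 3 if j + 2 < n and pagedata[i + 2] == pagedata[j + 2] else 2
--                 commonsubseq[key] = ''.join(pagedata[i:i + length])
--
--     # Emit: at a keyed page, greedily consume pages while their concatenation stays a
--     # prefix of the stored subsequence (tracked by an index, no repeated joins).
--     out = []
--     soff = 0
--     while soff < n:
--         offset = 1
--         cseq = commonsubseq.get(pagedata[soff])
--         if cseq is not None:
--             pos = 0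
--             while soff + offset < n:
--                 page = pagedata[soff + offset - 1]
--                 if cseq[pos:pos + len(page)] != page:
--                     break
--                 pos += len(page)
--                 offset += 1
--             if offset > 2:
--                 offset -= 1
--         out.append(''.join(pagedata[soff:soff + offset]))
--         soff += offset
--     return out
-- ===== Notes on version B (the rewrite author's own statement) =====
-- stated objective: faster
-- what changed: Phase 1's O(n^2) nested rescan for the first later repeat of each adjacent pair is replaced by a dict indexing every adjacent pair to its ascending position list (first later match found by scanning that bucket, each bucket scanned at most once), and phase 2's repeated slice-join/startswith tests are replaced by an incremental prefix pointer into the stored subsequence.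
import Mathlib
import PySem

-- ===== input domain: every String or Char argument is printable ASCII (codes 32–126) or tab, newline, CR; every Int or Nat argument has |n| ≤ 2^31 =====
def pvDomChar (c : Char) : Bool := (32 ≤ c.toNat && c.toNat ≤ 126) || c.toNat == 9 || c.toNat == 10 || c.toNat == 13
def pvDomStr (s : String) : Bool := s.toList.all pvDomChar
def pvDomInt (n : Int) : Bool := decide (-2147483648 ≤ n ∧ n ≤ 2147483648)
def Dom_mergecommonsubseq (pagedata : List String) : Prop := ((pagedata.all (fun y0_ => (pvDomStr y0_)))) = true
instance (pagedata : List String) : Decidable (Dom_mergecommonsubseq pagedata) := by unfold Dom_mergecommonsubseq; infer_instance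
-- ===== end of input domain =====

-- B replaces A's quadratic rescan for repeated adjacent pairs by a pair→positions index and
-- the emit phase's repeated joins by an incremental prefix pointer (objective: faster).
-- The loops are ported with a structural fuel counter that is provably never exhausted
-- (each loop advances its index by ≥ 1 and stops before pd.length), so the ports are exact.

-- ===== PORT A =====
-- `while offset < 3 and j+offset < len and pagedata[i+offset] == pagedata[j+offset]`
-- (all indices used are nonnegative and < len, so `getD _ ""` is exact; fuel 3 ≥ iterations)
def mcsMatch (pd : List String) (i j : Nat) : Nat → Nat → Nat
  | 0, offset => offset
  | fuel + 1, offset =>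
      if offset < 3 ∧ j + offset < pd.length ∧ pd.getD (i + offset) "" = pd.getD (j + offset) ""
      then mcsMatch pd i j fuel (offset + 1)
      else offset

-- the inner `for j in range(i+1, pagedatalen)` with its break (fuel = len ≥ iterations)
def mcsFindJ (pd : List String) (i : Nat) (d : PySem.Dict String String) :
    Nat → Nat → PySem.Dict String String
  | 0, _ => d
  | fuel + 1, j =>
      if j < pd.length then
        let offset := mcsMatch pd i j 3 0
        if offset > 1 then
          let cseq := PySem.Str.join "" ((pd.drop i).take offset)   -- ''.join(pagedata[i:i+offset])
          if (d.get? (pd.getD i "")).isNone then d.insert (pd.getD i "") cseq else d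
        else mcsFindJ pd i d fuel (j + 1)
      else d

-- the outer `for i in range(pagedatalen)` building commonsubseq
def mcsPhase1 (pd : List String) : Nat → PySem.Dict String String → Nat → PySem.Dict String String
  | 0, d, _ => d
  | fuel + 1, d, i =>
      if i < pd.length then
        mcsPhase1 pd fuel
          (if (d.get? (pd.getD i "")).isNone then mcsFindJ pd i d pd.length (i + 1) else d) (i + 1)
      else d

-- `while soff+offset < len and commonsubseq[...].startswith(''.join(pagedata[soff:soff+offset]))`
def mcsGrow (pd : List String) (cseq : String) (soff : Nat) : Nat → Nat → Nat
  | 0, offset => offset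
  | fuel + 1, offset =>
      if soff + offset < pd.length ∧
          PySem.Str.startswith cseq (PySem.Str.join "" ((pd.drop soff).take offset)) = true
      then mcsGrow pd cseq soff fuel (offset + 1)
      else offset

-- the offset computed by one iteration of A's emit loop
def mcsStep (pd : List String) (d : PySem.Dict String String) (soff : Nat) : Nat :=
  match d.get? (pd.getD soff "") with
  | some cseq =>
      let o := mcsGrow pd cseq soff pd.length 1
      if o - 1 > 1 then o - 1 else o
  | none => 1

-- A's second `while soff < pagedatalen` loop
def mcsEmit (pd : List String) (d : PySem.Dict String String) : Nat → Nat → List String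
  | 0, _ => []
  | fuel + 1, soff =>
      if soff < pd.length then
        PySem.Str.join "" ((pd.drop soff).take (mcsStep pd d soff)) ::
          mcsEmit pd d fuel (soff + mcsStep pd d soff)
      else []

def mergecommonsubseq (pagedata : List String) : List String :=
  mcsEmit pagedata (mcsPhase1 pagedata pagedata.length PySem.Dict.empty 0) pagedata.length 0

-- ===== PORT B =====
-- the adjacent pair starting at position j
def pvPairAt (pd : List String) (j : Nat) : String × String := (pd.getD j "", pd.getD (j + 1) "")

-- `pairpos.setdefault((pagedata[j], pagedata[j+1]), []).append(j)` over j in range(n-1)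
def altPairpos (pd : List String) : PySem.Dict (String × String) (List Nat) :=
  (List.range (pd.length - 1)).foldl
    (fun d j => d.modify (pvPairAt pd j) [] (fun l => l ++ [j])) PySem.Dict.empty

-- one iteration of Source B's `for i in range(n-1)` loop
def altStep1 (pd : List String) (pairpos : PySem.Dict (String × String) (List Nat))
    (cs : PySem.Dict String String) (i : Nat) : PySem.Dict String String :=
  let key := pd.getD i ""
  if (cs.get? key).isSome then cs
  else
    -- `posns = pairpos.get(pair)` then `next((t for t in posns if t > i), None)`
    match ((pairpos.getD (pvPairAt pd i) []).find? (fun t => decide (i < t))) with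
    | some j =>
        let length : Nat :=
          if j + 2 < pd.length ∧ pd.getD (i + 2) "" = pd.getD (j + 2) "" then 3 else 2
        cs.insert key (PySem.Str.join "" ((pd.drop i).take length))
    | none => cs

def altPhase1 (pd : List String) : PySem.Dict String String :=
  (List.range (pd.length - 1)).foldl (altStep1 pd (altPairpos pd)) PySem.Dict.empty

-- Source B's inner emit loop: `pos` is a cursor into cseq; `cseq[pos:pos+len(page)] != page` is
-- exact as drop/take since pos ≥ 0 (Python slices clamp exactly like drop/take do)
def altGrow (pd : List String) (cseq : List Char) (soff : Nat) : Nat → Nat → Nat → Nat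
  | 0, offset, _ => offset
  | fuel + 1, offset, pos =>
      if soff + offset < pd.length then
        let page := pd.getD (soff + offset - 1) ""
        if (cseq.drop pos).take page.toList.length = page.toList then
          altGrow pd cseq soff fuel (offset + 1) (pos + page.toList.length)
        else offset
      else offset

-- the offset for one iteration of Source B's emit loop
def altStep2 (pd : List String) (d : PySem.Dict String String) (soff : Nat) : Nat :=
  match d.get? (pd.getD soff "") with
  | some cseq =>
      let o := altGrow pd cseq.toList soff pd.length 1 0
      if o > 2 then o - 1 else o
  | none => 1

def altEmit (pd : List String) (d : PySem.Dict String String) : Nat → Nat → List String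
  | 0, _ => []
  | fuel + 1, soff =>
      if soff < pd.length then
        PySem.Str.join "" ((pd.drop soff).take (altStep2 pd d soff)) ::
          altEmit pd d fuel (soff + altStep2 pd d soff)
      else []

def mergecommonsubseq_alt (pagedata : List String) : List String :=
  altEmit pagedata (altPhase1 pagedata) pagedata.length 0

-- ===== PRECONDITION & SPEC =====
def Spec_mergecommonsubseq (pagedata : List String) (out : List String) : Prop := out = mergecommonsubseq_alt pagedata
instance (pagedata : List String) (out : List String) : Decidable (Spec_mergecommonsubseq pagedata out) := by unfold Spec_mergecommonsubseq; infer_instance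

-- ===== CLAIM (what is proved, stated in full; the proofs are below) =====
def Claim_equal_mergecommonsubseq : Prop := ∀ (pagedata : List String), Dom_mergecommonsubseq pagedata → Spec_mergecommonsubseq pagedata (mergecommonsubseq pagedata)

-- ===== LEMMAS AND PROOFS =====

-- ---- generic list lemmas ----

theorem pv_find?_congr {α : Type} (p q : α → Bool) :
    ∀ (l : List α), (∀ x ∈ l, p x = q x) → l.find? p = l.find? q := by
  intro l
  induction l with
  | nil => intro _; rfl
  | cons a l ih =>
      intro h
      rw [List.find?_cons, List.find?_cons, h a (by simp)]
      split
      · rfl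
      · exact ih (fun x hx => h x (by simp [hx]))

theorem pv_find?_range_eq (p : Nat → Bool) (n s : Nat) (h : ∀ j, j < s → p j = false) :
    (List.range n).find? p = (List.range' s (n - s)).find? p := by
  by_cases hs : s ≤ n
  · have hsplit : List.range' 0 s ++ List.range' s (n - s) = List.range' 0 n := by
      have := List.range'_append (s := 0) (m := s) (n := n - s) (step := 1)
      simpa [Nat.add_sub_cancel' hs] using this
    rw [List.range_eq_range', ← hsplit, List.find?_append]
    have hnone : (List.range' 0 s).find? p = none := by
      rw [List.find?_eq_none]
      intro x hx
      rw [List.mem_range'_1] at hx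
      simp [h x (by omega)]
    rw [hnone, Option.none_or]
  · have h0 : n - s = 0 := by omega
    rw [h0]
    have hnone : (List.range n).find? p = none := by
      rw [List.find?_eq_none]
      intro x hx
      rw [List.mem_range] at hx
      simp [h x (by omega)]
    rw [hnone]
    rfl

theorem chars_join_nil_eq_flatten : ∀ ls : List (List Char), PySem.Chars.join [] ls = ls.flatten := by
  intro ls
  induction ls with
  | nil => simp [PySem.Chars.join_nil]
  | cons a rest ih =>
      cases rest with
      | nil => simpa using PySem.Chars.join_singleton [] a
      | cons b r => rw [PySem.Chars.join_cons_cons]; simp [ih]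

theorem join_empty_toList (l : List String) :
    (PySem.Str.join "" l).toList = (l.map String.toList).flatten := by
  rw [PySem.Str.toList_join]
  have h : ("" : String).toList = [] := rfl
  rw [h, chars_join_nil_eq_flatten]

theorem prefix_append_iff' {α : Type} (a b c : List α) (h : a <+: c) :
    ((a ++ b) <+: c) ↔ ((c.drop a.length).take b.length = b) := by
  obtain ⟨r, rfl⟩ := h
  rw [List.prefix_append_right_inj, List.drop_left, List.prefix_iff_eq_take, eq_comm]

-- ---- emit phase: the two inner loops run in lockstep ----

theorem grow_eq_aux (pd : List String) (cseq : String) (soff : Nat) :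
    ∀ (fuel offset pos : Nat), 1 ≤ offset →
      pos = ((((pd.drop soff).take (offset - 1)).map String.toList).flatten).length →
      ((((pd.drop soff).take (offset - 1)).map String.toList).flatten <+: cseq.toList) →
      mcsGrow pd cseq soff fuel offset = altGrow pd cseq.toList soff fuel offset pos := by
  intro fuel
  induction fuel with
  | zero => intro offset pos _ _ _; rfl
  | succ fuel ih =>
      intro offset pos h1 hp hpre
      rw [mcsGrow, altGrow]
      by_cases hlt : soff + offset < pd.length
      · have hget : (pd.drop soff)[offset - 1]? = some (pd.getD (soff + offset - 1) "") := by
          rw [List.getElem?_drop]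
          have hix : soff + (offset - 1) < pd.length := by omega
          rw [List.getD_eq_getElem?_getD]
          rw [List.getElem?_eq_getElem hix, List.getElem?_eq_getElem (by omega : soff + offset - 1 < pd.length)]
          simp only [Option.getD_some, Option.some.injEq]
          congr 1
          omega
        have htake : (pd.drop soff).take offset
            = (pd.drop soff).take (offset - 1) ++ [pd.getD (soff + offset - 1) ""] := by
          conv_lhs => rw [show offset = (offset - 1) + 1 by omega]
          rw [List.take_add_one, hget]
          rfl
        have hflat : ((((pd.drop soff).take offset).map String.toList).flatten)
            = ((((pd.drop soff).take (offset - 1)).map String.toList).flatten)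
              ++ (pd.getD (soff + offset - 1) "").toList := by
          rw [htake]; simp
        have hcond : (PySem.Str.startswith cseq (PySem.Str.join "" ((pd.drop soff).take offset)) = true)
            ↔ ((cseq.toList.drop pos).take (pd.getD (soff + offset - 1) "").toList.length
                = (pd.getD (soff + offset - 1) "").toList) := by
          rw [PySem.Str.startswith_eq, PySem.Chars.startswith_iff, join_empty_toList, hflat, hp]
          exact prefix_append_iff' _ _ _ hpre
        by_cases hc : (cseq.toList.drop pos).take (pd.getD (soff + offset - 1) "").toList.length
            = (pd.getD (soff + offset - 1) "").toList
        · have hpre' : ((((pd.drop soff).take offset).map String.toList).flatten <+: cseq.toList) := by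
            rw [hflat]
            refine (prefix_append_iff' _ _ _ hpre).mpr ?_
            rw [← hp]
            exact hc
          rw [if_pos ⟨hlt, hcond.mpr hc⟩, if_pos hlt]
          dsimp only
          rw [if_pos hc]
          exact ih (offset + 1) (pos + (pd.getD (soff + offset - 1) "").toList.length)
            (by omega)
            (by rw [show offset + 1 - 1 = offset by omega, hflat, hp]; simp)
            (by rw [show offset + 1 - 1 = offset by omega]; exact hpre')
        · rw [if_neg (fun hcj => hc (hcond.mp hcj.2)), if_pos hlt]
          dsimp only
          rw [if_neg hc]
      · rw [if_neg (fun hc => hlt hc.1), if_neg hlt]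

theorem grow_eq (pd : List String) (cseq : String) (soff : Nat) :
    mcsGrow pd cseq soff pd.length 1 = altGrow pd cseq.toList soff pd.length 1 0 := by
  exact grow_eq_aux pd cseq soff pd.length 1 0 (by omega) (by simp) (by simp)

theorem step_eq (pd : List String) (d : PySem.Dict String String) (soff : Nat) :
    mcsStep pd d soff = altStep2 pd d soff := by
  cases hk : d.get? (pd.getD soff "") with
  | none => unfold mcsStep altStep2; rw [hk]
  | some cseq =>
      unfold mcsStep altStep2
      rw [hk]
      dsimp only
      rw [grow_eq]
      split_ifs <;> omega

theorem emit_eq (pd : List String) (d : PySem.Dict String String) :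
    ∀ (fuel soff : Nat), mcsEmit pd d fuel soff = altEmit pd d fuel soff := by
  intro fuel
  induction fuel with
  | zero => intro soff; rfl
  | succ fuel ih =>
      intro soff
      rw [mcsEmit, altEmit, step_eq]
      by_cases h : soff < pd.length
      · rw [if_pos h, if_pos h, ih]
      · rw [if_neg h, if_neg h]

-- ---- phase 1: the two dictionary-building passes agree ----

-- A's match condition at candidate j, and the recorded length there
def pvPb (pd : List String) (i j : Nat) : Bool :=
  decide (j + 1 < pd.length ∧ pd.getD i "" = pd.getD j "" ∧ pd.getD (i + 1) "" = pd.getD (j + 1) "")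

def pvLen (pd : List String) (i j : Nat) : Nat :=
  if j + 2 < pd.length ∧ pd.getD (i + 2) "" = pd.getD (j + 2) "" then 3 else 2

theorem mcsMatch_char (pd : List String) (i j : Nat) (hj : j < pd.length) :
    mcsMatch pd i j 3 0 =
      if pd.getD i "" = pd.getD j "" then
        (if j + 1 < pd.length ∧ pd.getD (i + 1) "" = pd.getD (j + 1) "" then pvLen pd i j else 1)
      else 0 := by
  by_cases c0 : pd.getD i "" = pd.getD j ""
  · rw [mcsMatch, if_pos ⟨by omega, by simpa using hj, by simpa using c0⟩]
    by_cases c1 : j + 1 < pd.length ∧ pd.getD (i + 1) "" = pd.getD (j + 1) ""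
    · rw [mcsMatch, if_pos ⟨by omega, c1.1, c1.2⟩]
      unfold pvLen
      by_cases c2 : j + 2 < pd.length ∧ pd.getD (i + 2) "" = pd.getD (j + 2) ""
      · rw [mcsMatch, if_pos ⟨by omega, c2.1, c2.2⟩]
        rw [show mcsMatch pd i j 0 3 = 3 from rfl]
        rw [if_pos c0, if_pos c1, if_pos c2]
      · rw [mcsMatch, if_neg (fun hx => c2 ⟨hx.2.1, hx.2.2⟩)]
        rw [if_pos c0, if_pos c1, if_neg c2]
    · rw [mcsMatch, if_neg (fun hx => c1 ⟨hx.2.1, hx.2.2⟩)]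
      rw [if_pos c0, if_neg c1]
  · rw [mcsMatch, if_neg (fun hx => c0 (by simpa using hx.2.2))]
    rw [if_neg c0]

theorem mcsFindJ_char (pd : List String) (i : Nat) (d : PySem.Dict String String) :
    ∀ (fuel s : Nat), pd.length ≤ s + fuel →
      mcsFindJ pd i d fuel s =
        match (List.range' s (pd.length - s)).find? (pvPb pd i) with
        | some j =>
            if (d.get? (pd.getD i "")).isNone
            then d.insert (pd.getD i "") (PySem.Str.join "" ((pd.drop i).take (pvLen pd i j)))
            else d
        | none => d := by
  intro fuel
  induction fuel with
  | zero =>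
      intro s hf
      have h0 : pd.length - s = 0 := by omega
      rw [mcsFindJ, h0]
      rfl
  | succ fuel ih =>
      intro s hf
      by_cases hs : s < pd.length
      · have hrange : List.range' s (pd.length - s) = s :: List.range' (s + 1) (pd.length - (s + 1)) := by
          rw [show pd.length - s = (pd.length - (s + 1)) + 1 by omega, List.range'_succ]
        rw [mcsFindJ, if_pos hs, hrange, List.find?_cons]
        dsimp only
        have hm := mcsMatch_char pd i s hs
        by_cases hb : pvPb pd i s = true
        · have hb' := (decide_eq_true_iff).mp hb
          have hmv : mcsMatch pd i s 3 0 = pvLen pd i s := by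
            rw [hm, if_pos hb'.2.1, if_pos ⟨hb'.1, hb'.2.2⟩]
          have hlen2 : 2 ≤ pvLen pd i s := by unfold pvLen; split <;> omega
          rw [if_pos (by omega : mcsMatch pd i s 3 0 > 1), hb, hmv]
        · have hble : mcsMatch pd i s 3 0 ≤ 1 := by
            rw [hm]
            split_ifs with c0 c1
            · exact absurd (by rw [pvPb]; exact decide_eq_true ⟨c1.1, c0, c1.2⟩) hb
            · omega
            · omega
          rw [if_neg (by omega : ¬ mcsMatch pd i s 3 0 > 1)]
          rw [Bool.not_eq_true] at hb
          rw [hb]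
          exact ih (s + 1) (by omega)
      · have h0 : pd.length - s = 0 := by omega
        rw [mcsFindJ, if_neg hs, h0]
        rfl

-- one step of A's outer phase-1 loop
def pvStepA (pd : List String) (d : PySem.Dict String String) (i : Nat) :
    PySem.Dict String String :=
  if (d.get? (pd.getD i "")).isNone then mcsFindJ pd i d pd.length (i + 1) else d

theorem mcsPhase1_foldl (pd : List String) :
    ∀ (fuel i : Nat) (d : PySem.Dict String String), pd.length ≤ i + fuel →
      mcsPhase1 pd fuel d i = (List.range' i (pd.length - i)).foldl (pvStepA pd) d := by
  intro fuel
  induction fuel with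
  | zero =>
      intro i d hf
      have h0 : pd.length - i = 0 := by omega
      rw [mcsPhase1, h0]
      rfl
  | succ fuel ih =>
      intro i d hf
      by_cases h : i < pd.length
      · have hrange : List.range' i (pd.length - i) = i :: List.range' (i + 1) (pd.length - (i + 1)) := by
          rw [show pd.length - i = (pd.length - (i + 1)) + 1 by omega, List.range'_succ]
        rw [mcsPhase1, if_pos h, hrange, List.foldl_cons]
        exact ih (i + 1) _ (by omega)
      · have h0 : pd.length - i = 0 := by omega
        rw [mcsPhase1, if_neg h, h0]
        rfl

theorem altPairpos_getD (pd : List String) (c : String × String) :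
    (altPairpos pd).getD c []
      = (List.range (pd.length - 1)).filter (fun j => pvPairAt pd j == c) := by
  unfold altPairpos
  rw [← List.foldl_map (f := fun j => (pvPairAt pd j, j))
    (g := fun (d : PySem.Dict (String × String) (List Nat)) p => d.modify p.1 [] (fun l => l ++ [p.2]))]
  rw [PySem.Dict.getD_foldl_modify_append]
  rw [PySem.Dict.getD_empty, List.nil_append, List.filter_map]
  rw [List.map_map]
  simp [Function.comp_def]

theorem firstJ_eq (pd : List String) (i : Nat) :
    ((List.range (pd.length - 1)).filter (fun j => pvPairAt pd j == pvPairAt pd i)).find?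
        (fun t => decide (i < t))
      = (List.range' (i + 1) (pd.length - (i + 1))).find? (pvPb pd i) := by
  rw [List.find?_filter]
  have h1 : (List.range (pd.length - 1)).find?
        (fun j => decide ((pvPairAt pd j == pvPairAt pd i) = true ∧ decide (i < j) = true))
      = (List.range (pd.length - 1)).find? (fun j => decide (i < j) && pvPb pd i j) := by
    apply pv_find?_congr
    intro j hj
    rw [List.mem_range] at hj
    have hjn : j + 1 < pd.length := by omega
    rw [pvPb, Bool.eq_iff_iff]
    simp only [decide_eq_true_eq, Bool.and_eq_true, beq_iff_eq, pvPairAt, Prod.mk.injEq]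
    constructor
    · rintro ⟨⟨ha, hb⟩, hc⟩
      exact ⟨hc, hjn, ha.symm, hb.symm⟩
    · rintro ⟨hc, _, ha, hb⟩
      exact ⟨⟨ha.symm, hb.symm⟩, hc⟩
  rw [h1]
  have h2 : (List.range (pd.length - 1)).find? (fun j => decide (i < j) && pvPb pd i j)
      = (List.range pd.length).find? (fun j => decide (i < j) && pvPb pd i j) := by
    rcases Nat.eq_zero_or_pos pd.length with h0 | hpos
    · rw [h0]
    · conv_rhs => rw [show pd.length = (pd.length - 1) + 1 by omega, List.range_succ]
      rw [List.find?_append]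
      have hlast : (fun j => decide (i < j) && pvPb pd i j) (pd.length - 1) = false := by
        have : pvPb pd i (pd.length - 1) = false := by
          simp only [pvPb, decide_eq_false_iff_not]
          intro hx
          omega
        simp [this]
      rw [show ([pd.length - 1].find? (fun j => decide (i < j) && pvPb pd i j)) = none by
        rw [List.find?_eq_none]; intro x hx; rw [List.mem_singleton] at hx; simp [hx, hlast]]
      rw [Option.or_none]
  rw [h2, pv_find?_range_eq (fun j => decide (i < j) && pvPb pd i j) pd.length (i + 1)
    (fun j hjlt => by
      have : decide (i < j) = false := by simp; omega
      simp [this])]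
  apply pv_find?_congr
  intro j hjmem
  rw [List.mem_range'_1] at hjmem
  have : decide (i < j) = true := by simp; omega
  simp [this]

theorem stepA_eq_stepB (pd : List String) (cs : PySem.Dict String String) (i : Nat) :
    pvStepA pd cs i = altStep1 pd (altPairpos pd) cs i := by
  cases hget : cs.get? (pd.getD i "") with
  | some v =>
      unfold pvStepA altStep1
      simp only [List.getD_eq_getElem?_getD] at hget
      simp [hget]
  | none =>
      unfold pvStepA altStep1
      rw [hget]
      simp only [Option.isNone_none, if_true]
      rw [mcsFindJ_char pd i cs pd.length (i + 1) (by omega)]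
      rw [altPairpos_getD, firstJ_eq]
      cases hfind : (List.range' (i + 1) (pd.length - (i + 1))).find? (pvPb pd i) with
      | none => simp
      | some j =>
          dsimp only
          rw [hget]
          simp [pvLen]

theorem altStep1_last (pd : List String) (acc : PySem.Dict String String) (m : Nat)
    (hm : pd.length ≤ m + 1) : altStep1 pd (altPairpos pd) acc m = acc := by
  unfold altStep1
  dsimp only
  by_cases hk : (acc.get? (pd.getD m "")).isSome
  · rw [if_pos hk]
  · rw [if_neg hk]
    have hnone : ((altPairpos pd).getD (pvPairAt pd m) []).find? (fun t => decide (m < t)) = none := by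
      rw [altPairpos_getD, List.find?_eq_none]
      intro t ht
      rw [List.mem_filter, List.mem_range] at ht
      simp only [decide_eq_true_eq]
      omega
    rw [hnone]

theorem phase1_eq (pd : List String) :
    mcsPhase1 pd pd.length PySem.Dict.empty 0 = altPhase1 pd := by
  rw [mcsPhase1_foldl pd pd.length 0 _ (by omega)]
  rw [Nat.sub_zero, ← List.range_eq_range']
  rw [PySem.List.foldl_congr_mem (List.range pd.length) (pvStepA pd)
    (altStep1 pd (altPairpos pd)) PySem.Dict.empty (fun acc x _ => stepA_eq_stepB pd acc x)]
  unfold altPhase1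
  rcases Nat.eq_zero_or_pos pd.length with h0 | hpos
  · rw [h0]
  · conv_lhs => rw [show pd.length = (pd.length - 1) + 1 by omega, List.range_succ]
    rw [List.foldl_append]
    simp only [List.foldl_cons, List.foldl_nil]
    exact altStep1_last pd _ _ (by omega)

-- ===== VERDICT (by name: the statement is the Claim_ definition above) =====
theorem mergecommonsubseq_spec : Claim_equal_mergecommonsubseq := by
  intro pagedata _
  unfold Spec_mergecommonsubseq mergecommonsubseq mergecommonsubseq_alt
  rw [phase1_eq, emit_eq]
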